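-- pv_equiv track=rewrite | github.com/alexanderholman/ah1365_mphil_to_phd_upgrade_report | generate-interfaces.py | generate_unique_millers
-- ===== SOURCE A (Python) =====
-- def canonical_miller(miller):
--     """
--     For a cubic crystal, symmetry makes (h,k,l) equivalent to any permutation
--     of the absolute values. Sorting the absolute values (in descending order)
--     gives a canonical form.
--     """
--     h, k, l = sorted(map(abs, miller), reverse=True)
--     return (h, k, l)
--
-- def generate_unique_millers(max_index=2):
--     """
--     Generate unique Miller indices (excluding (0,0,0)) up to a given maximum absolute value.
--     """
--     millers = set()
--     for h in range(-max_index, max_index + 1):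
--         for k in range(-max_index, max_index + 1):
--             for l in range(-max_index, max_index + 1):
--                 if (h, k, l) == (0, 0, 0):
--                     continue
--                 can = canonical_miller((h, k, l))
--                 millers.add(can)
--     return sorted(list(millers))
-- ===== SOURCE B (Python) =====
-- def generate_unique_millers(max_index=2):
--     """
--     Enumerate the canonical representatives h >= k >= l >= 0 directly,
--     in ascending lexicographic order, skipping (0, 0, 0).
--     """
--     out = []
--     for h in range(0, max_index + 1):
--         for k in range(0, h + 1):
--             for l in range(0, k + 1):
--                 if (h, k, l) == (0, 0, 0):
--                     continue
--                 out.append((h, k, l))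
--     return out
-- ===== Notes on version B (the rewrite author's own statement) =====
-- stated objective: faster
-- what changed: Instead of scanning all (2n+1)^3 signed triples, canonicalising each and deduplicating through a set that is sorted at the end, B enumerates the canonical triples h>=k>=l>=0 directly in ascending lexicographic order, so the set and the final sort disappear.
import Mathlib
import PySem

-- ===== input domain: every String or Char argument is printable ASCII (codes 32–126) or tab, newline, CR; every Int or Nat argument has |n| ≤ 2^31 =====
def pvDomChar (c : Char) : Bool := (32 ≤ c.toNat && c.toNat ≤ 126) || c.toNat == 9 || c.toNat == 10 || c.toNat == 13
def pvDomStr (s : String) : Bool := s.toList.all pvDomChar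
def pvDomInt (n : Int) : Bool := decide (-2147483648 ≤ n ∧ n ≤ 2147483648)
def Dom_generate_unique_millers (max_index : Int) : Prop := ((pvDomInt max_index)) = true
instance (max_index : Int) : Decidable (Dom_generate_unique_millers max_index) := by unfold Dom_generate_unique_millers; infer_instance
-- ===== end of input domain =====

-- B enumerates the canonical triples h ≥ k ≥ l ≥ 0 directly in ascending lexicographic
-- order, so A's set and final sort disappear (measurably faster by a constant factor).

-- ===== PORT A =====
def canonical_miller (miller : List Int) : List Int :=
  PySem.List.sorted (miller.map (fun x => abs x)) (fun x => x) true

def generate_unique_millers (max_index : Int) : List (List Int) :=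
  let millers : PySem.Set (List Int) :=
    (PySem.List.pyRange (-max_index) (max_index + 1) 1).foldl (fun s h =>
      (PySem.List.pyRange (-max_index) (max_index + 1) 1).foldl (fun s k =>
        (PySem.List.pyRange (-max_index) (max_index + 1) 1).foldl (fun s l =>
          if h = 0 ∧ k = 0 ∧ l = 0 then s
          else PySem.Set.add s (canonical_miller [h, k, l])) s) s)
      PySem.Set.empty
  PySem.List.sorted millers (fun x => x) false

-- ===== PORT B =====
def generate_unique_millers_alt (max_index : Int) : List (List Int) :=
  (PySem.List.pyRange 0 (max_index + 1) 1).foldl (fun out h =>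
    (PySem.List.pyRange 0 (h + 1) 1).foldl (fun out k =>
      (PySem.List.pyRange 0 (k + 1) 1).foldl (fun out l =>
        if h = 0 ∧ k = 0 ∧ l = 0 then out else out ++ [[h, k, l]]) out) out) []

-- ===== PRECONDITION & SPEC =====
def Spec_generate_unique_millers (max_index : Int) (out : List (List Int)) : Prop := out = generate_unique_millers_alt max_index
instance (max_index : Int) (out : List (List Int)) : Decidable (Spec_generate_unique_millers max_index out) := by unfold Spec_generate_unique_millers; infer_instance

-- ===== CLAIM (what is proved, stated in full; the proofs are below) =====
def Claim_equal_generate_unique_millers : Prop := ∀ (max_index : Int), Dom_generate_unique_millers max_index → Spec_generate_unique_millers max_index (generate_unique_millers max_index)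

-- ===== LEMMAS AND PROOFS =====

-- generic: membership through a fold whose step adds according to Q
theorem mem_foldl_step {α β : Type} (F : List α → β → List α) (Q : β → α → Prop)
    (hF : ∀ s b y, y ∈ F s b ↔ y ∈ s ∨ Q b y) (l : List β) :
    ∀ (s : List α) (y : α), y ∈ l.foldl F s ↔ y ∈ s ∨ ∃ b ∈ l, Q b y := by
  induction l with
  | nil => intro s y; simp
  | cons b t ih =>
    intro s y
    simp only [List.foldl_cons, ih, hF, List.mem_cons]
    constructor
    · rintro ((h | h) | ⟨x, hx, hq⟩)
      · exact Or.inl h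
      · exact Or.inr ⟨b, Or.inl rfl, h⟩
      · exact Or.inr ⟨x, Or.inr hx, hq⟩
    · rintro (h | ⟨x, (rfl | hx), hq⟩)
      · exact Or.inl (Or.inl h)
      · exact Or.inl (Or.inr hq)
      · exact Or.inr ⟨x, hx, hq⟩

-- generic: a fold whose step preserves Nodup preserves Nodup
theorem nodup_foldl_step {α β : Type} (F : List α → β → List α)
    (hF : ∀ s b, s.Nodup → (F s b).Nodup) (l : List β) :
    ∀ s : List α, s.Nodup → (l.foldl F s).Nodup := by
  induction l with
  | nil => intro s hs; simpa using hs
  | cons b t ih => intro s hs; exact ih _ (hF _ _ hs)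

-- the canonical triples up to n, as a predicate
def IsCan (n : Int) (y : List Int) : Prop :=
  ∃ a b c : Int, y = [a, b, c] ∧ 0 ≤ c ∧ c ≤ b ∧ b ≤ a ∧ a ≤ n ∧ 0 < a

theorem canonical_spec (h k l : Int) :
    ∃ a b c : Int, canonical_miller [h, k, l] = [a, b, c] ∧
      ([a, b, c] : List Int).Perm [abs h, abs k, abs l] ∧ c ≤ b ∧ b ≤ a := by
  have hp := PySem.List.sorted_perm ([h, k, l].map (fun x => abs x)) (fun x : Int => x) true
  have hw := PySem.List.sorted_pairwise_rev ([h, k, l].map (fun x => abs x)) (fun x : Int => x)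
  have hlen : (canonical_miller [h, k, l]).length = 3 := by
    unfold canonical_miller; simp
  obtain ⟨a, b, c, habc⟩ := List.length_eq_three.mp hlen
  refine ⟨a, b, c, habc, ?_, ?_, ?_⟩
  · have := hp; rw [show PySem.List.sorted ([h,k,l].map (fun x => abs x)) (fun x : Int => x) true = canonical_miller [h,k,l] from rfl, habc] at this
    simpa using this
  · have := hw; rw [show PySem.List.sorted ([h,k,l].map (fun x => abs x)) (fun x : Int => x) true = canonical_miller [h,k,l] from rfl, habc] at this
    simp only [List.pairwise_cons] at this
    exact this.2.1 c (by simp)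
  · have := hw; rw [show PySem.List.sorted ([h,k,l].map (fun x => abs x)) (fun x : Int => x) true = canonical_miller [h,k,l] from rfl, habc] at this
    simp only [List.pairwise_cons] at this
    exact this.1 b (by simp)

theorem canonical_of_sorted (a b c : Int) (h1 : 0 ≤ c) (h2 : c ≤ b) (h3 : b ≤ a) :
    canonical_miller [a, b, c] = [a, b, c] := by
  unfold canonical_miller
  have hm : ([a, b, c] : List Int).map (fun x => abs x) = [a, b, c] := by
    simp [abs_of_nonneg, h1, le_trans h1 h2, le_trans (le_trans h1 h2) h3]
  rw [hm]
  refine PySem.List.sorted_rev_eq_self_of_pairwise _ _ ?_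
  refine List.Pairwise.cons ?_ (List.Pairwise.cons ?_ (List.pairwise_singleton _ _))
  · intro x hx; simp at hx; rcases hx with rfl | rfl
    · exact h3
    · exact le_trans h2 h3
  · intro x hx; simp at hx; subst hx; exact h2

-- A's set, membership characterised
theorem mem_A_set (n y : _) :
    y ∈ ((PySem.List.pyRange (-n) (n + 1) 1).foldl (fun s h =>
      (PySem.List.pyRange (-n) (n + 1) 1).foldl (fun s k =>
        (PySem.List.pyRange (-n) (n + 1) 1).foldl (fun s l =>
          if h = 0 ∧ k = 0 ∧ l = 0 then s
          else PySem.Set.add s (canonical_miller [h, k, l])) s) s)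
      (PySem.Set.empty : PySem.Set (List Int))) ↔
    ∃ h ∈ PySem.List.pyRange (-n) (n + 1) 1, ∃ k ∈ PySem.List.pyRange (-n) (n + 1) 1,
      ∃ l ∈ PySem.List.pyRange (-n) (n + 1) 1,
        ¬(h = 0 ∧ k = 0 ∧ l = 0) ∧ y = canonical_miller [h, k, l] := by
  rw [mem_foldl_step _
    (fun h y => ∃ k ∈ PySem.List.pyRange (-n) (n + 1) 1, ∃ l ∈ PySem.List.pyRange (-n) (n + 1) 1,
        ¬(h = 0 ∧ k = 0 ∧ l = 0) ∧ y = canonical_miller [h, k, l]) ?_]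
  · simp [PySem.Set.empty]
  intro s h y
  rw [mem_foldl_step _
    (fun k y => ∃ l ∈ PySem.List.pyRange (-n) (n + 1) 1,
        ¬(h = 0 ∧ k = 0 ∧ l = 0) ∧ y = canonical_miller [h, k, l]) ?_]
  intro s k y
  rw [mem_foldl_step _
    (fun l y => ¬(h = 0 ∧ k = 0 ∧ l = 0) ∧ y = canonical_miller [h, k, l]) ?_]
  intro s l y
  by_cases hc : h = 0 ∧ k = 0 ∧ l = 0
  · simp [hc]
  · simp [hc, PySem.Set.mem_add]

-- B as a nested flatMap (the appends of the three loops, flattened)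
theorem inner3 (h k : Int) (out : List (List Int)) :
    (PySem.List.pyRange 0 (k + 1) 1).foldl
      (fun out l => if h = 0 ∧ k = 0 ∧ l = 0 then out else out ++ [[h, k, l]]) out
    = out ++ ((PySem.List.pyRange 0 (k + 1) 1).filter
        (fun l => decide ¬(h = 0 ∧ k = 0 ∧ l = 0))).map (fun l => [h, k, l]) := by
  rw [PySem.List.foldl_congr_mem _ _
      (fun out l => if ¬(h = 0 ∧ k = 0 ∧ l = 0) then out ++ [[h, k, l]] else out) _ ?_]
  · exact PySem.List.foldl_append_ite _ _ _ _
  · intro acc x _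
    by_cases hc : h = 0 ∧ k = 0 ∧ x = 0 <;> simp [hc]

theorem mid2 (h : Int) (out : List (List Int)) :
    (PySem.List.pyRange 0 (h + 1) 1).foldl (fun out k =>
      (PySem.List.pyRange 0 (k + 1) 1).foldl
        (fun out l => if h = 0 ∧ k = 0 ∧ l = 0 then out else out ++ [[h, k, l]]) out) out
    = out ++ (PySem.List.pyRange 0 (h + 1) 1).flatMap (fun k =>
        ((PySem.List.pyRange 0 (k + 1) 1).filter
          (fun l => decide ¬(h = 0 ∧ k = 0 ∧ l = 0))).map (fun l => [h, k, l])) := by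
  rw [PySem.List.foldl_congr_mem _ _
      (fun out k => out ++ ((PySem.List.pyRange 0 (k + 1) 1).filter
          (fun l => decide ¬(h = 0 ∧ k = 0 ∧ l = 0))).map (fun l => [h, k, l])) _
      (fun acc k _ => inner3 h k acc)]
  exact PySem.List.foldl_append_eq_flatMap _ _ _

theorem B_flat (n : Int) :
    generate_unique_millers_alt n =
      (PySem.List.pyRange 0 (n + 1) 1).flatMap (fun h =>
        (PySem.List.pyRange 0 (h + 1) 1).flatMap (fun k =>
          ((PySem.List.pyRange 0 (k + 1) 1).filter
            (fun l => decide ¬(h = 0 ∧ k = 0 ∧ l = 0))).map (fun l => [h, k, l]))) := by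
  unfold generate_unique_millers_alt
  rw [PySem.List.foldl_congr_mem _ _
      (fun out h => out ++ (PySem.List.pyRange 0 (h + 1) 1).flatMap (fun k =>
          ((PySem.List.pyRange 0 (k + 1) 1).filter
            (fun l => decide ¬(h = 0 ∧ k = 0 ∧ l = 0))).map (fun l => [h, k, l]))) _
      (fun acc h _ => mid2 h acc)]
  rw [PySem.List.foldl_append_eq_flatMap]
  simp

theorem lex3 {h k l h' k' l' : Int}
    (hlt : h < h' ∨ (h = h' ∧ (k < k' ∨ (k = k' ∧ l < l')))) :
    ([h, k, l] : List Int) < [h', k', l'] := by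
  rw [List.cons_lt_cons_iff]
  rcases hlt with hlt | ⟨rfl, hlt | ⟨rfl, hlt⟩⟩
  · exact Or.inl hlt
  · exact Or.inr ⟨rfl, (List.cons_lt_cons_iff).mpr (Or.inl hlt)⟩
  · exact Or.inr ⟨rfl, (List.cons_lt_cons_iff).mpr
      (Or.inr ⟨rfl, (List.cons_lt_cons_iff).mpr (Or.inl hlt)⟩)⟩

theorem B_pairwise (n : Int) :
    (generate_unique_millers_alt n).Pairwise (fun a b => a < b) := by
  rw [B_flat, List.flatMap_def, List.pairwise_flatten]
  constructor
  · intro blk hblk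
    simp only [List.mem_map] at hblk
    obtain ⟨h, _, rfl⟩ := hblk
    rw [List.flatMap_def, List.pairwise_flatten]
    constructor
    · intro row hrow
      simp only [List.mem_map] at hrow
      obtain ⟨k, _, rfl⟩ := hrow
      rw [List.pairwise_map]
      exact (((PySem.List.pairwise_lt_pyRange_one 0 (k + 1)).sublist
        List.filter_sublist).imp
        (fun hab => lex3 (Or.inr ⟨rfl, Or.inr ⟨rfl, hab⟩⟩)))
    · rw [List.pairwise_map]
      refine (PySem.List.pairwise_lt_pyRange_one 0 (h + 1)).imp ?_
      intro k1 k2 hk x hx y hy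
      simp only [List.mem_map, List.mem_filter] at hx hy
      obtain ⟨l1, _, rfl⟩ := hx
      obtain ⟨l2, _, rfl⟩ := hy
      exact lex3 (Or.inr ⟨rfl, Or.inl hk⟩)
  · rw [List.pairwise_map]
    refine (PySem.List.pairwise_lt_pyRange_one 0 (n + 1)).imp ?_
    intro h1 h2 hh x hx y hy
    simp only [List.mem_flatMap, List.mem_map, List.mem_filter] at hx hy
    obtain ⟨k1, _, l1, _, rfl⟩ := hx
    obtain ⟨k2, _, l2, _, rfl⟩ := hy
    exact lex3 (Or.inl hh)

theorem B_nodup (n : Int) : (generate_unique_millers_alt n).Nodup :=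
  (B_pairwise n).imp (fun h => ne_of_lt h)

theorem mem_B_iff (n : Int) (y : List Int) :
    y ∈ generate_unique_millers_alt n ↔ IsCan n y := by
  rw [B_flat]
  unfold IsCan
  simp only [List.mem_flatMap, List.mem_map, List.mem_filter,
    PySem.List.mem_pyRange_one, decide_eq_true_eq]
  constructor
  · rintro ⟨h, ⟨h0, h1⟩, k, ⟨k0, k1⟩, l, ⟨⟨l0, l1⟩, hnz⟩, rfl⟩
    exact ⟨h, k, l, rfl, by omega, by omega, by omega, by omega, by omega⟩
  · rintro ⟨a, b, c, rfl, hc0, hcb, hba, han, ha0⟩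
    exact ⟨a, ⟨by omega, by omega⟩, b, ⟨by omega, by omega⟩, c,
      ⟨⟨by omega, by omega⟩, by omega⟩, rfl⟩

theorem mem_A_iff (n : Int) (y : List Int) :
    y ∈ ((PySem.List.pyRange (-n) (n + 1) 1).foldl (fun s h =>
      (PySem.List.pyRange (-n) (n + 1) 1).foldl (fun s k =>
        (PySem.List.pyRange (-n) (n + 1) 1).foldl (fun s l =>
          if h = 0 ∧ k = 0 ∧ l = 0 then s
          else PySem.Set.add s (canonical_miller [h, k, l])) s) s)
      (PySem.Set.empty : PySem.Set (List Int))) ↔ IsCan n y := by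
  rw [mem_A_set]
  constructor
  · rintro ⟨h, hh, k, hk, l, hl, hnz, rfl⟩
    rw [PySem.List.mem_pyRange_one] at hh hk hl
    obtain ⟨a, b, c, heq, hperm, hcb, hba⟩ := canonical_spec h k l
    refine ⟨a, b, c, heq, ?_, hcb, hba, ?_, ?_⟩
    · have hc : c ∈ ([abs h, abs k, abs l] : List Int) :=
        hperm.subset (by simp)
      simp only [List.mem_cons, List.not_mem_nil, or_false] at hc
      rcases hc with rfl | rfl | rfl <;> exact abs_nonneg _
    · have hc : a ∈ ([abs h, abs k, abs l] : List Int) :=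
        hperm.subset (by simp)
      simp only [List.mem_cons, List.not_mem_nil, or_false] at hc
      rcases hc with rfl | rfl | rfl <;> exact abs_le.mpr (by omega)
    · have hx : ∃ x ∈ ([abs h, abs k, abs l] : List Int), 0 < x := by
        by_cases h0 : h = 0
        · by_cases k0 : k = 0
          · refine ⟨abs l, by simp, ?_⟩
            have : l ≠ 0 := fun l0 => hnz ⟨h0, k0, l0⟩
            exact abs_pos.mpr this
          · exact ⟨abs k, by simp, abs_pos.mpr k0⟩
        · exact ⟨abs h, by simp, abs_pos.mpr h0⟩
      obtain ⟨x, hxm, hx0⟩ := hx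
      have hxa : x ∈ ([a, b, c] : List Int) := (hperm.mem_iff).mpr hxm
      simp only [List.mem_cons, List.not_mem_nil, or_false] at hxa
      rcases hxa with rfl | rfl | rfl <;> omega
  · rintro ⟨a, b, c, rfl, hc0, hcb, hba, han, ha0⟩
    refine ⟨a, ?_, b, ?_, c, ?_, ?_, (canonical_of_sorted a b c hc0 hcb hba).symm⟩
    · rw [PySem.List.mem_pyRange_one]; omega
    · rw [PySem.List.mem_pyRange_one]; omega
    · rw [PySem.List.mem_pyRange_one]; omega
    · omega

theorem A_nodup (n : Int) :
    ((PySem.List.pyRange (-n) (n + 1) 1).foldl (fun s h =>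
      (PySem.List.pyRange (-n) (n + 1) 1).foldl (fun s k =>
        (PySem.List.pyRange (-n) (n + 1) 1).foldl (fun s l =>
          if h = 0 ∧ k = 0 ∧ l = 0 then s
          else PySem.Set.add s (canonical_miller [h, k, l])) s) s)
      (PySem.Set.empty : PySem.Set (List Int))).Nodup := by
  refine nodup_foldl_step _ ?_ _ _ List.nodup_nil
  intro s h hs
  refine nodup_foldl_step _ ?_ _ _ hs
  intro s k hs
  refine nodup_foldl_step _ ?_ _ _ hs
  intro s l hs
  split_ifs
  · exact hs
  · exact PySem.Set.nodup_add _ _ hs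

-- ===== VERDICT (by name: the statement is the Claim_ definition above) =====
theorem generate_unique_millers_spec : Claim_equal_generate_unique_millers := by
  intro n _
  unfold Spec_generate_unique_millers generate_unique_millers
  dsimp only
  have hD : (fun (a b : List Int) => a.decidableLT b)
      = (LinearOrder.toDecidableLT : DecidableLT (List Int)) := by
    funext a b; exact Subsingleton.elim _ _
  rw [hD]
  refine PySem.List.sorted_eq_of_perm_of_pairwise_lt (key := fun x : List Int => x) _ _ ?_ ?_
  · exact (List.perm_ext_iff_of_nodup (B_nodup n) (A_nodup n)).mpr
      (fun y => (mem_B_iff n y).trans (mem_A_iff n y).symm)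
  · exact B_pairwise n
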